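-- pv_equiv track=rewrite | github.com/herbras/chief-apapun | clawchief/scripts/sheet_helper.py | normalize_name_piece
-- ===== SOURCE A (Python) =====
-- def normalize_name_piece(value: str) -> str:
--     cleaned = value.split(",", 1)[0].strip().lower()
--     tokens = []
--     current = []
--     for char in cleaned:
--         if char.isalnum():
--             current.append(char)
--         elif current:
--             tokens.append("".join(current))
--             current = []
--     if current:
--         tokens.append("".join(current))
--     return " ".join(tokens)
-- ===== SOURCE B (Python) =====
-- def normalize_name_piece(value: str) -> str:
--     cleaned = value.split(",", 1)[0].strip().lower()
--     mapped = "".join(c if c.isalnum() else " " for c in cleaned)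
--     return " ".join(mapped.split())
-- ===== Notes on version B (the rewrite author's own statement) =====
-- stated objective: idiomatic
-- what changed: Replaces the manual tokens/current accumulator loop by mapping every non-alphanumeric character to a space and delegating run-collapsing tokenization to str.split().
import Mathlib
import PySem

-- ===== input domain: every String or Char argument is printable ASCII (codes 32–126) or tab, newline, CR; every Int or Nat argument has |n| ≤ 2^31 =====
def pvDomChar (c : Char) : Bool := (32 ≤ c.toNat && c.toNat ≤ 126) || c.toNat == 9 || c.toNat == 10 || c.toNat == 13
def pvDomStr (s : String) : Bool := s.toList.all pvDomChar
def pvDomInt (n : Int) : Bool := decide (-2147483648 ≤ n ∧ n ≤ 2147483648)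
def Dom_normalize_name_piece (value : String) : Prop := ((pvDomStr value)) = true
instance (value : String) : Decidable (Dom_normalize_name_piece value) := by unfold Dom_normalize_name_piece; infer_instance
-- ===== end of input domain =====

-- B replaces A's manual tokens/current accumulator loop by mapping each non-alnum char to a
-- space and letting str.split() do the tokenization (idiomatic; same cost).

-- ===== PORT A =====
-- the accumulator step of A's for-loop: state = (tokens, current)
def npStep (st : List String × List Char) (c : Char) : List String × List Char :=
  if PySem.Chars.isalnum c then (st.1, st.2 ++ [c])
  else if st.2.isEmpty then st
  else (st.1 ++ [String.ofList st.2], [])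

def normalize_name_piece (value : String) : String :=
  let cleaned := PySem.Str.lower (PySem.Str.strip
    ((PySem.List.pyGet? ((PySem.Str.splitMax? value "," 1).getD []) 0).getD ""))
  let st := cleaned.toList.foldl npStep ([], [])
  let tokens := if st.2.isEmpty then st.1 else st.1 ++ [String.ofList st.2]
  PySem.Str.join " " tokens

-- ===== PORT B =====
def normalize_name_piece_alt (value : String) : String :=
  let cleaned := PySem.Str.lower (PySem.Str.strip
    ((PySem.List.pyGet? ((PySem.Str.splitMax? value "," 1).getD []) 0).getD ""))
  let mapped := String.ofList (cleaned.toList.map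
    (fun c => if PySem.Chars.isalnum c then c else ' '))
  PySem.Str.join " " (PySem.Str.split₀ mapped)

-- ===== PRECONDITION & SPEC =====
def Spec_normalize_name_piece (value : String) (out : String) : Prop := out = normalize_name_piece_alt value
instance (value : String) (out : String) : Decidable (Spec_normalize_name_piece value out) := by unfold Spec_normalize_name_piece; infer_instance

-- ===== CLAIM (what is proved, stated in full; the proofs are below) =====
def Claim_equal_normalize_name_piece : Prop := ∀ (value : String), Dom_normalize_name_piece value → Spec_normalize_name_piece value (normalize_name_piece value)

-- ===== LEMMAS AND PROOFS =====

-- an alphanumeric character is never a whitespace character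
theorem isalnum_not_isspace (c : Char) (ha : PySem.Chars.isalnum c = true) :
    PySem.Chars.isspace c = false := by
  simp only [PySem.Chars.isalnum, PySem.Chars.isalpha, PySem.Chars.isdigit, PySem.Chars.isspace,
    PySem.Chars.isupper, PySem.Chars.islower, Bool.or_eq_true, Bool.and_eq_true,
    decide_eq_true_eq, Bool.or_eq_false_iff, Bool.and_eq_false_iff, decide_eq_false_iff_not,
    Char.le_def, UInt32.le_iff_toNat_le, Char.toNat,
    show ('A').val.toNat = 65 from rfl, show ('Z').val.toNat = 90 from rfl,
    show ('a').val.toNat = 97 from rfl, show ('z').val.toNat = 122 from rfl,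
    show ('0').val.toNat = 48 from rfl, show ('9').val.toNat = 57 from rfl] at *
  omega

-- split₀.go's accumulator just prepends (reversed) to the eventual result
theorem go_acc (cs : List Char) (cur : List Char) (acc : List (List Char)) :
    PySem.Chars.split₀.go cs cur acc = acc.reverse ++ PySem.Chars.split₀.go cs cur [] := by
  induction cs generalizing cur acc with
  | nil =>
    by_cases h : cur.isEmpty <;> simp [PySem.Chars.split₀.go, h]
  | cons c rest ih =>
    by_cases hs : PySem.Chars.isspace c <;> by_cases h : cur.isEmpty
    · simp only [PySem.Chars.split₀.go, hs, h, if_true]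
      exact ih [] acc
    · simp only [PySem.Chars.split₀.go, hs, h, if_true, if_false]
      rw [ih [] (cur.reverse :: acc), ih [] [cur.reverse]]
      simp
    · simp only [PySem.Chars.split₀.go, hs, h, if_false]
      exact ih (c :: cur) acc
    · simp only [PySem.Chars.split₀.go, hs, h, if_false]
      exact ih (c :: cur) acc

-- main invariant: A's fold, finalized, equals split₀ of the space-mapped characters
theorem fold_eq_go (cs : List Char) (ts : List String) (cur : List Char) :
    (let st := cs.foldl npStep (ts, cur)
     if st.2.isEmpty then st.1 else st.1 ++ [String.ofList st.2]) =
    ts ++ (PySem.Chars.split₀.go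
      (cs.map (fun c => if PySem.Chars.isalnum c then c else ' ')) cur.reverse []).map
        String.ofList := by
  induction cs generalizing ts cur with
  | nil =>
    by_cases h : cur.isEmpty
    · have hc : cur = [] := by simpa [List.isEmpty_iff] using h
      subst hc
      simp [PySem.Chars.split₀.go]
    · have hne : cur ≠ [] := by simpa [List.isEmpty_iff] using h
      simp [PySem.Chars.split₀.go, h, List.isEmpty_iff, hne]
  | cons c rest ih =>
    simp only [List.foldl_cons, List.map_cons]
    by_cases ha : PySem.Chars.isalnum c
    · have hs := isalnum_not_isspace c ha
      rw [show PySem.Chars.split₀.go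
            ((if PySem.Chars.isalnum c then c else ' ') ::
              rest.map (fun cc => if PySem.Chars.isalnum cc then cc else ' ')) cur.reverse [] =
            PySem.Chars.split₀.go
              (rest.map (fun cc => if PySem.Chars.isalnum cc then cc else ' ')) (c :: cur.reverse) []
          from by simp [PySem.Chars.split₀.go, ha, hs],
        show npStep (ts, cur) c = (ts, cur ++ [c]) from by simp [npStep, ha],
        show c :: cur.reverse = (cur ++ [c]).reverse from by simp]
      exact ih ts (cur ++ [c])
    · have hsp : PySem.Chars.isspace ' ' = true := by decide
      by_cases h : cur.isEmpty
      · have hc : cur = [] := by simpa [List.isEmpty_iff] using h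
        subst hc
        rw [show PySem.Chars.split₀.go
              ((if PySem.Chars.isalnum c then c else ' ') ::
                rest.map (fun cc => if PySem.Chars.isalnum cc then cc else ' '))
                (List.nil (α := Char)).reverse [] =
              PySem.Chars.split₀.go
                (rest.map (fun cc => if PySem.Chars.isalnum cc then cc else ' ')) [] []
            from by simp [PySem.Chars.split₀.go, ha, hsp],
          show npStep (ts, []) c = (ts, []) from by simp [npStep, ha]]
        simpa using ih ts []
      · have hne : cur ≠ [] := by simpa [List.isEmpty_iff] using h
        have hrne : cur.reverse.isEmpty = false := by simp [List.isEmpty_iff, hne]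
        rw [show PySem.Chars.split₀.go
              ((if PySem.Chars.isalnum c then c else ' ') ::
                rest.map (fun cc => if PySem.Chars.isalnum cc then cc else ' ')) cur.reverse [] =
              PySem.Chars.split₀.go
                (rest.map (fun cc => if PySem.Chars.isalnum cc then cc else ' ')) [] [cur]
            from by simp [PySem.Chars.split₀.go, ha, hsp, hrne],
          go_acc _ [] [cur],
          show npStep (ts, cur) c = (ts ++ [String.ofList cur], []) from by simp [npStep, ha, h]]
        simpa using ih (ts ++ [String.ofList cur]) []

-- ===== VERDICT (by name: the statement is the Claim_ definition above) =====
theorem normalize_name_piece_spec : Claim_equal_normalize_name_piece := by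
  intro value _
  unfold Spec_normalize_name_piece normalize_name_piece normalize_name_piece_alt
  simp only [PySem.Str.split₀, PySem.Chars.split₀, String.toList_ofList]
  exact congrArg (PySem.Str.join " ") (by simpa using fold_eq_go _ [] [])
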